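-- pv_equiv track=rewrite | github.com/mniyk/fx-library | fx_library/utils.py | four_direction_ranges
-- ===== SOURCE A (Python) =====
-- def four_direction_ranges(direction_ranges):
--     result = []
--
--     key_list = list(direction_ranges.keys())
--
--     for one_ranges in direction_ranges[key_list[0]]:
--         for two_ranges in direction_ranges[key_list[1]]:
--             for three_ranges in direction_ranges[key_list[2]]:
--                 for four_ranges in direction_ranges[key_list[3]]:
--                     result.append(
--                         {
--                             "ranges": {
--                                 key_list[0]: one_ranges,
--                                 key_list[1]: two_ranges,
--                                 key_list[2]: three_ranges,
--                                 key_list[3]: four_ranges}})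
--
--     return result
-- ===== SOURCE B (Python) =====
-- def four_direction_ranges(direction_ranges):
--     keys = list(direction_ranges)
--     combos = [{}]
--     for i in range(4):
--         if not combos:
--             return []
--         k = keys[i]
--         combos = [{**c, k: v} for c in combos for v in direction_ranges[k]]
--     return [{"ranges": c} for c in combos]
-- ===== Notes on version B (the rewrite author's own statement) =====
-- stated objective: alternative
-- what changed: Replaces the four fixed nested loops with a fold over range(4) that expands a running list of partial combination dicts one key at a time (with an early return once the list empties), then wraps each combination once at the end.
import Mathlib
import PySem

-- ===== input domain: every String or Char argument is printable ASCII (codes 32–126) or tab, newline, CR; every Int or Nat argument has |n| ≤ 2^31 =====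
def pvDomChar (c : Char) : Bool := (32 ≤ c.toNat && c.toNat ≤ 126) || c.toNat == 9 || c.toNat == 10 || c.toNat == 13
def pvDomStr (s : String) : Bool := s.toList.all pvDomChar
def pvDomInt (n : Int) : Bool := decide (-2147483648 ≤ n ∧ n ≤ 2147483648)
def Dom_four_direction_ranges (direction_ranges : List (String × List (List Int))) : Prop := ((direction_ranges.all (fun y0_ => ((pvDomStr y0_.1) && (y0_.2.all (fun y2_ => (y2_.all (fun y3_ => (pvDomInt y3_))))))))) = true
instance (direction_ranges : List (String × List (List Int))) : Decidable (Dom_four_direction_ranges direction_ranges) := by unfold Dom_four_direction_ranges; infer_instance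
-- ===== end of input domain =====

-- B replaces A's four fixed nested loops by a fold that expands a running list of
-- partial combination dicts one key at a time (alternative decomposition, same cost).


-- ===== PORT A =====
-- Each key_list[i] is read lazily, exactly where A's loops read it; a 'none'
-- (Python IndexError, excluded by Pre_) leaves the accumulator unchanged, which is
-- only reached outside Pre_.  direction_ranges[k] for k a key is getD k [] (no KeyError).
def four_direction_ranges (direction_ranges : List (String × List (List Int))) : List (List (String × List (String × List Int))) :=
  let d := PySem.Dict.ofList direction_ranges
  let key_list := d.keys
  match PySem.List.pyGet? key_list 0 with
  | none => []    -- Python raises IndexError here; excluded by Pre_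
  | some k0 =>
    (d.getD k0 []).foldl (fun result one_ranges =>
      match PySem.List.pyGet? key_list 1 with
      | none => result
      | some k1 =>
        (d.getD k1 []).foldl (fun result two_ranges =>
          match PySem.List.pyGet? key_list 2 with
          | none => result
          | some k2 =>
            (d.getD k2 []).foldl (fun result three_ranges =>
              match PySem.List.pyGet? key_list 3 with
              | none => result
              | some k3 =>
                (d.getD k3 []).foldl (fun result four_ranges =>
                  result ++ [[("ranges",
                    [(k0, one_ranges), (k1, two_ranges),
                     (k2, three_ranges), (k3, four_ranges)])]]) result) result) result) []

-- ===== PORT B =====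
-- {**c, k: v}: k0..k3 are distinct dict keys, so the dict-merge is exactly append.
def fdrExpand (d : PySem.Dict String (List (List Int))) (k : String)
    (combos : List (List (String × List Int))) : List (List (String × List Int)) :=
  combos.flatMap (fun c => (d.getD k []).map (fun v => c ++ [(k, v)]))

-- the 'for i in range(4)' loop of Source B, with its early 'return []'
def fdrGo (d : PySem.Dict String (List (List Int))) (keys : List String) :
    List Int → List (List (String × List Int)) → List (List (String × List (String × List Int)))
  | [], combos => combos.map (fun c => [("ranges", c)])
  | i :: is, combos =>
    if combos.isEmpty then []
    else match PySem.List.pyGet? keys i with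
      | none => []    -- Python raises IndexError here; excluded by Pre_
      | some k => fdrGo d keys is (fdrExpand d k combos)

def four_direction_ranges_alt (direction_ranges : List (String × List (List Int))) : List (List (String × List (String × List Int))) :=
  let d := PySem.Dict.ofList direction_ranges
  fdrGo d d.keys [0, 1, 2, 3] [[]]

-- ===== PRECONDITION & SPEC =====
-- Pre_ excludes exactly the inputs on which Python A raises IndexError: fewer than four
-- keys with every key's range list nonempty, so the loops reach the first out-of-range
-- key_list index before any empty range list stops them.  B raises IndexError on exactly
-- the same inputs (its early 'return []' fires whenever an empty list stops A's loops).
def Pre_four_direction_ranges (direction_ranges : List (String × List (List Int))) : Prop :=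
  4 ≤ (PySem.Dict.ofList direction_ranges).keys.length ∨
    ((PySem.Dict.ofList direction_ranges).keys.any
      (fun k => ((PySem.Dict.ofList direction_ranges).getD k []).isEmpty)) = true
instance (direction_ranges : List (String × List (List Int))) : Decidable (Pre_four_direction_ranges direction_ranges) := by unfold Pre_four_direction_ranges; infer_instance
def pvWitness_four_direction_ranges : (List (String × List (List Int))) :=
  [("up", [[1, 2], [3]]), ("down", [[4]]), ("left", [[5], [6]]), ("right", [[7]])]
def Spec_four_direction_ranges (direction_ranges : List (String × List (List Int))) (out : List (List (String × List (String × List Int)))) : Prop := out = four_direction_ranges_alt direction_ranges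
instance (direction_ranges : List (String × List (List Int))) (out : List (List (String × List (String × List Int)))) : Decidable (Spec_four_direction_ranges direction_ranges out) := by unfold Spec_four_direction_ranges; infer_instance

-- ===== CLAIM (what is proved, stated in full; the proofs are below) =====
def Claim_equal_four_direction_ranges : Prop := ∀ (direction_ranges : List (String × List (List Int))), Dom_four_direction_ranges direction_ranges → Pre_four_direction_ranges direction_ranges → Spec_four_direction_ranges direction_ranges (four_direction_ranges direction_ranges)

-- ===== LEMMAS AND PROOFS =====
theorem pv_foldl_id {α β : Type} (l : List α) (acc : List β) :
    l.foldl (fun r _ => r) acc = acc := by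
  induction l generalizing acc with
  | nil => rfl
  | cons x xs ih => simp [List.foldl_cons, ih]

theorem pv_foldl_app {α β : Type} (l : List α) (f : α → List β) (acc : List β) :
    l.foldl (fun r x => r ++ f x) acc = acc ++ l.flatMap f := by
  induction l generalizing acc with
  | nil => simp
  | cons x xs ih => simp [List.foldl_cons, ih, List.append_assoc]

theorem fdrGo_nil (d : PySem.Dict String (List (List Int))) (keys : List String)
    (is : List Int) : fdrGo d keys is [] = [] := by
  cases is <;> simp [fdrGo]

theorem fdrGo_cons_some (d : PySem.Dict String (List (List Int))) (keys : List String)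
    (i : Int) (is : List Int) (k : String) (combos : List (List (String × List Int)))
    (h : PySem.List.pyGet? keys i = some k) :
    fdrGo d keys (i :: is) combos = fdrGo d keys is (fdrExpand d k combos) := by
  by_cases hc : combos = []
  · subst hc; simp [fdrGo, fdrGo_nil, fdrExpand]
  · simp [fdrGo, hc, h]

theorem fdrGo_cons_none (d : PySem.Dict String (List (List Int))) (keys : List String)
    (i : Int) (is : List Int) (combos : List (List (String × List Int)))
    (h : PySem.List.pyGet? keys i = none) :
    fdrGo d keys (i :: is) combos = [] := by
  by_cases hc : combos = []
  · subst hc; simp [fdrGo]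
  · simp [fdrGo, hc, h]

-- The all-four-keys branch: A's nested append-folds equal B's expand-then-wrap.
theorem pv_branch (d : PySem.Dict String (List (List Int))) (k0 k1 k2 k3 : String) :
    ((d.getD k0 []).foldl (fun result a =>
      ((d.getD k1 []).foldl (fun result b =>
        ((d.getD k2 []).foldl (fun result c =>
          ((d.getD k3 []).foldl (fun result e =>
            result ++ [[("ranges", [(k0,a),(k1,b),(k2,c),(k3,e)])]]) result)) result)) result)) []) =
    (fdrExpand d k3 (fdrExpand d k2 (fdrExpand d k1 (fdrExpand d k0 [[]])))).map
      (fun c => [("ranges", c)]) := by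
  simp only [pv_foldl_app, List.nil_append, fdrExpand]
  simp [List.flatMap_map, List.map_flatMap, List.flatMap_assoc, List.map_map, Function.comp_def]
  congr 1; funext a; congr 1; funext b; congr 1; funext c
  induction d.getD k3 [] with
  | nil => simp
  | cons x xs ih => simp [ih]

theorem pv_witness_ok :
    Dom_four_direction_ranges pvWitness_four_direction_ranges ∧
    Pre_four_direction_ranges pvWitness_four_direction_ranges := by decide

-- ===== VERDICT (by name: the statement is the Claim_ definition above) =====
theorem four_direction_ranges_spec : Claim_equal_four_direction_ranges := by
  intro dr _ _
  unfold Spec_four_direction_ranges four_direction_ranges four_direction_ranges_alt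
  rcases h0 : PySem.List.pyGet? (PySem.Dict.ofList dr).keys 0 with _ | k0
  · simp only [h0, fdrGo_cons_none _ _ _ _ _ h0]
  rcases h1 : PySem.List.pyGet? (PySem.Dict.ofList dr).keys 1 with _ | k1
  · simp only [h0, h1, fdrGo_cons_some _ _ _ _ _ _ h0, fdrGo_cons_none _ _ _ _ _ h1,
      pv_foldl_id]
  rcases h2 : PySem.List.pyGet? (PySem.Dict.ofList dr).keys 2 with _ | k2
  · simp only [h0, h1, h2, fdrGo_cons_some _ _ _ _ _ _ h0, fdrGo_cons_some _ _ _ _ _ _ h1,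
      fdrGo_cons_none _ _ _ _ _ h2, pv_foldl_id]
  rcases h3 : PySem.List.pyGet? (PySem.Dict.ofList dr).keys 3 with _ | k3
  · simp only [h0, h1, h2, h3, fdrGo_cons_some _ _ _ _ _ _ h0, fdrGo_cons_some _ _ _ _ _ _ h1,
      fdrGo_cons_some _ _ _ _ _ _ h2, fdrGo_cons_none _ _ _ _ _ h3, pv_foldl_id]
  · simp only [h0, h1, h2, h3]
    rw [fdrGo_cons_some _ _ _ _ _ _ h0, fdrGo_cons_some _ _ _ _ _ _ h1,
      fdrGo_cons_some _ _ _ _ _ _ h2, fdrGo_cons_some _ _ _ _ _ _ h3]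
    simp only [fdrGo]
    exact pv_branch (PySem.Dict.ofList dr) k0 k1 k2 k3
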